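-- pv_equiv track=rewrite | github.com/Zy8712/leetcode-practice | Python/Python_Q02500-Q02599/Q02588_MEDIUM/Q02588_Count_the_Number_of_Beautiful_Subarrays.py | beautifulSubarrays
-- ===== SOURCE A (Python) =====
-- def beautifulSubarrays(nums):
--     """
--     :type nums: List[int]
--     :rtype: int
--     """
--     count = 0
--     xor_sum = 0
--     freq = {0: 1}
--     for i in range(len(nums)):
--         xor_sum ^= nums[i]
--         if xor_sum in freq:
--             count += freq[xor_sum]
--         freq[xor_sum] = freq.get(xor_sum, 0) + 1
--     return count
-- ===== SOURCE B (Python) =====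
-- def beautifulSubarrays(nums):
--     """
--     :type nums: List[int]
--     :rtype: int
--     """
--     tally = {0: 1}
--     x = 0
--     for v in nums:
--         x ^= v
--         tally[x] = tally.get(x, 0) + 1
--     total = 0
--     for c in tally.values():
--         total += c * (c - 1) // 2
--     return total
-- ===== Notes on version B (the rewrite author's own statement) =====
-- stated objective: alternative
-- what changed: B replaces A's interleaved add-then-increment counting with a two-phase computation: one pass tallies all prefix XORs (seeded with 0) into a frequency dict, then a final pass sums c*(c-1)//2 over the buckets.
import Mathlib
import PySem

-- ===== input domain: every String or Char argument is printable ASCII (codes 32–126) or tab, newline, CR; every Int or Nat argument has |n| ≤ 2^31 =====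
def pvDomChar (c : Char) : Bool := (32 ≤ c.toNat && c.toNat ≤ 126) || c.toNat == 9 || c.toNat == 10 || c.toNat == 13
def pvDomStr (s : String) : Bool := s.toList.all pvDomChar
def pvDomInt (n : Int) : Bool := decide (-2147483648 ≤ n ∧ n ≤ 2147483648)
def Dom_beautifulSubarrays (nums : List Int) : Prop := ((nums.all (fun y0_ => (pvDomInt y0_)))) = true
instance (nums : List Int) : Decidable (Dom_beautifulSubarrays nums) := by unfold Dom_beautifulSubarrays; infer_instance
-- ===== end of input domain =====

-- B replaces A's interleaved "add current frequency, then increment" counting with a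
-- two-phase tally of all prefix XORs followed by a combinatorial c*(c-1)//2 pass (alternative; same O(n) cost).

-- ===== PORT A =====
-- one iteration of A's for-loop body: state (count, xor_sum, freq), element nums[i]
def aStep (s : Int × Int × PySem.Dict Int Int) (v : Int) : Int × Int × PySem.Dict Int Int :=
  let x := PySem.Int.bxor s.2.1 v
  let c := if s.2.2.contains x then s.1 + s.2.2.getD x 0 else s.1
  (c, x, s.2.2.insert x (s.2.2.getD x 0 + 1))

def beautifulSubarrays (nums : List Int) : Int :=
  ((PySem.List.pyRange 0 (nums.length : Int) 1).foldl
      (fun s i => aStep s (PySem.List.pyGetD nums i 0))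
      (0, 0, PySem.Dict.empty.insert 0 1)).1

-- ===== PORT B =====
-- one iteration of B's tally loop: state (x, tally), element v
def bStep (s : Int × PySem.Dict Int Int) (v : Int) : Int × PySem.Dict Int Int :=
  let x := PySem.Int.bxor s.1 v
  (x, s.2.insert x (s.2.getD x 0 + 1))

def beautifulSubarrays_alt (nums : List Int) : Int :=
  let st := nums.foldl bStep (0, PySem.Dict.empty.insert 0 1)
  st.2.values.foldl (fun t c => t + PySem.Int.floordiv (c * (c - 1)) 2) 0

-- ===== PRECONDITION & SPEC =====
def Spec_beautifulSubarrays (nums : List Int) (out : Int) : Prop := out = beautifulSubarrays_alt nums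
instance (nums : List Int) (out : Int) : Decidable (Spec_beautifulSubarrays nums out) := by unfold Spec_beautifulSubarrays; infer_instance

-- ===== CLAIM (what is proved, stated in full; the proofs are below) =====
def Claim_equal_beautifulSubarrays : Prop := ∀ (nums : List Int), Dom_beautifulSubarrays nums → Spec_beautifulSubarrays nums (beautifulSubarrays nums)

-- ===== LEMMAS AND PROOFS =====

-- pairs-from-a-bucket count, as B computes it
def binom (c : Int) : Int := PySem.Int.floordiv (c * (c - 1)) 2

-- sum of pair counts over all buckets of a dict
def S (d : PySem.Dict Int Int) : Int := (d.items.map (fun p => binom p.2)).sum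

lemma binom_closed (m : Int) : binom m = (m * (m - 1)) / 2 := by
  unfold binom
  rw [PySem.Int.floordiv_eq_ediv_of_pos (by omega)]

lemma binom_succ (m : Int) : binom (m + 1) = binom m + m := by
  rw [binom_closed, binom_closed]
  obtain ⟨q, hq⟩ := Int.even_mul_succ_self m
  have h1 : (m + 1) * ((m + 1) - 1) = 2 * q := by linear_combination hq
  have h2 : m * (m - 1) = 2 * (q - m) := by linear_combination hq
  rw [h1, h2, Int.mul_ediv_cancel_left _ (by omega), Int.mul_ediv_cancel_left _ (by omega)]
  omega

lemma sum_replace (k m : Int) : ∀ (l : List (Int × Int)), (l.map Prod.fst).Nodup → (k, m) ∈ l →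
    ((l.map (fun p => if p.1 == k then (k, m + 1) else p)).map (fun p => binom p.2)).sum
      = (l.map (fun p => binom p.2)).sum + m := by
  intro l
  induction l with
  | nil => intro _ h; simp at h
  | cons p t ih =>
    intro hnd hmem
    simp only [List.map_cons, List.nodup_cons, List.mem_map] at hnd
    by_cases hk : p.1 = k
    · -- head is the bucket for k; its value must be m, and no key k appears in t
      have hpm : p = (k, m) := by
        rcases List.mem_cons.mp hmem with h | h
        · exact h.symm
        · exact absurd ⟨(k, m), h, by simp [hk]⟩ hnd.1
      have ht : t.map (fun p => if p.1 == k then (k, m + 1) else p) = t := by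
        conv_rhs => rw [← List.map_id t]
        apply List.map_congr_left
        intro q hq
        have : q.1 ≠ k := fun h => hnd.1 ⟨q, hq, by rw [h, hk]⟩
        simp [this]
      simp only [List.map_cons, hpm, ht, beq_self_eq_true, if_true, List.sum_cons]
      rw [binom_succ]
      ring
    · -- head untouched; recurse
      have hmem' : (k, m) ∈ t := by
        rcases List.mem_cons.mp hmem with h | h
        · exact absurd (by rw [← h]) hk
        · exact h
      have hne : (p.1 == k) = false := by simp [hk]
      simp only [List.map_cons, hne, Bool.false_eq_true, if_false, List.sum_cons,
        ih hnd.2 hmem']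
      ring

lemma S_insert (d : PySem.Dict Int Int) (k : Int) (hnd : d.keys.Nodup) :
    S (d.insert k (d.getD k 0 + 1)) = S d + d.getD k 0 := by
  unfold S
  by_cases hc : d.contains k = true
  · obtain ⟨m, hm⟩ := Option.isSome_iff_exists.mp
      (by rw [← PySem.Dict.contains_eq_isSome_get? d k]; exact hc)
    have hgd : d.getD k 0 = m := PySem.Dict.getD_of_get?_eq_some d 0 hm
    have hmem : (k, m) ∈ d.items := PySem.Dict.mem_items_of_get?_eq_some d hm
    rw [hgd, PySem.Dict.items_insert_of_contains d _ hc]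
    have := sum_replace k m d.items hnd hmem
    rw [List.map_map] at this
    simpa [Function.comp] using this
  · have h0 : d.getD k 0 = 0 := PySem.Dict.getD_of_not_contains d 0 (by simpa using hc)
    rw [h0, PySem.Dict.items_insert_of_not_contains d _ (by simpa using hc)]
    simp [binom_closed]

-- invariant of A's loop: count grows exactly by the growth of the pair-count sum
lemma count_eq : ∀ (t : List Int) (c x : Int) (d : PySem.Dict Int Int), d.keys.Nodup →
    (t.foldl aStep (c, x, d)).1 = c + S ((t.foldl bStep (x, d)).2) - S d := by
  intro t
  induction t with
  | nil => intro c x d _; simp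
  | cons v t ih =>
    intro c x d hnd
    have hstep : aStep (c, x, d) v
        = (c + d.getD (PySem.Int.bxor x v) 0, PySem.Int.bxor x v,
           d.insert (PySem.Int.bxor x v) (d.getD (PySem.Int.bxor x v) 0 + 1)) := by
      unfold aStep
      by_cases hc : d.contains (PySem.Int.bxor x v) = true
      · simp [hc]
      · have h0 : d.getD (PySem.Int.bxor x v) 0 = 0 :=
          PySem.Dict.getD_of_not_contains d 0 (by simpa using hc)
        simp [hc, h0]
    have hnd' : (d.insert (PySem.Int.bxor x v) (d.getD (PySem.Int.bxor x v) 0 + 1)).keys.Nodup :=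
      PySem.Dict.nodup_keys_insert _ _ _ hnd
    simp only [List.foldl_cons, hstep, ih _ _ _ hnd', S_insert d _ hnd]
    have : bStep (x, d) v
        = (PySem.Int.bxor x v,
           d.insert (PySem.Int.bxor x v) (d.getD (PySem.Int.bxor x v) 0 + 1)) := rfl
    rw [this]
    ring

-- ===== VERDICT (by name: the statement is the Claim_ definition above) =====
theorem beautifulSubarrays_spec : Claim_equal_beautifulSubarrays := by
  intro nums _
  unfold Spec_beautifulSubarrays beautifulSubarrays beautifulSubarrays_alt
  rw [PySem.List.foldl_pyRange_zero_pyGetD' nums 0 aStep (0, 0, PySem.Dict.empty.insert 0 1)]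
  have hnd : (PySem.Dict.empty.insert (0 : Int) (1 : Int)).keys.Nodup :=
    PySem.Dict.nodup_keys_insert _ _ _ PySem.Dict.nodup_keys_empty
  rw [count_eq nums 0 0 _ hnd]
  have hS0 : S (PySem.Dict.empty.insert (0 : Int) (1 : Int)) = 0 := by decide
  rw [hS0]
  have hfold : ∀ (l : List Int) (init : Int),
      l.foldl (fun t c => t + PySem.Int.floordiv (c * (c - 1)) 2) init
        = init + (l.map binom).sum := by
    intro l
    induction l with
    | nil => intro init; simp
    | cons a l ih => intro init; simp only [List.foldl_cons, List.map_cons, List.sum_cons, ih]; unfold binom; ring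
  rw [hfold]
  unfold S
  simp only [PySem.Dict.values, List.map_map, Function.comp_def]
  ring
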